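-- pv_equiv track=rewrite | github.com/task-official/Ego-centric-action | src/evaluate.py | match_boundaries
-- ===== SOURCE A (Python) =====
-- from typing import Dict, List
--
-- def match_boundaries(preds: List[int], gts: List[int], tolerance: int) -> Dict[str, int]:
--     matched_gt = set()
--     tp = 0
--     for pred in preds:
--         best_idx = None
--         best_diff = tolerance + 1
--         for idx, gt in enumerate(gts):
--             if idx in matched_gt:
--                 continue
--             diff = abs(pred - gt)
--             if diff <= tolerance and diff < best_diff:
--                 best_diff = diff
--                 best_idx = idx
--         if best_idx is not None:
--             matched_gt.add(best_idx)
--             tp += 1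
--
--     fp = len(preds) - tp
--     fn = len(gts) - tp
--     return {"tp": tp, "fp": fp, "fn": fn}
-- ===== SOURCE B (Python) =====
-- from typing import Dict, List
--
-- def _first_ge(arr, t, lo, hi):
--     # binary search: first position p in [lo, hi] with arr[p][1] >= t (arr sorted by value)
--     while lo < hi:
--         mid = (lo + hi) // 2
--         if arr[mid][1] < t:
--             lo = mid + 1
--         else:
--             hi = mid
--     return lo
--
-- def match_boundaries(preds: List[int], gts: List[int], tolerance: int) -> Dict[str, int]:
--     # remaining (index, value) pairs, sorted by value; stability keeps equal values in index order
--     arr = sorted(enumerate(gts), key=lambda p: p[1])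
--     tp = 0
--     for pred in preds:
--         lo = _first_ge(arr, pred, 0, len(arr))
--         cand = []
--         if lo < len(arr):
--             i, g = arr[lo]
--             cand.append((g - pred, i, lo))
--         if lo > 0:
--             v = arr[lo - 1][1]
--             p = _first_ge(arr, v, 0, lo - 1)
--             i, g = arr[p]
--             cand.append((pred - g, i, p))
--         if cand:
--             diff, _, pos = min(cand)
--             if diff <= tolerance:
--                 tp += 1
--                 arr = arr[:pos] + arr[pos + 1:]
--     return {"tp": tp, "fp": len(preds) - tp, "fn": len(gts) - tp}
-- ===== Notes on version B (the rewrite author's own statement) =====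
-- stated objective: faster
-- what changed: B pre-sorts the (index, gt) pairs by value and serves each prediction with a hand-rolled binary search for the two nearest remaining values (ties resolved by original index), deleting the matched pair from the sorted list, instead of A's full linear scan over all gts with a matched-index set per prediction.
import Mathlib
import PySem

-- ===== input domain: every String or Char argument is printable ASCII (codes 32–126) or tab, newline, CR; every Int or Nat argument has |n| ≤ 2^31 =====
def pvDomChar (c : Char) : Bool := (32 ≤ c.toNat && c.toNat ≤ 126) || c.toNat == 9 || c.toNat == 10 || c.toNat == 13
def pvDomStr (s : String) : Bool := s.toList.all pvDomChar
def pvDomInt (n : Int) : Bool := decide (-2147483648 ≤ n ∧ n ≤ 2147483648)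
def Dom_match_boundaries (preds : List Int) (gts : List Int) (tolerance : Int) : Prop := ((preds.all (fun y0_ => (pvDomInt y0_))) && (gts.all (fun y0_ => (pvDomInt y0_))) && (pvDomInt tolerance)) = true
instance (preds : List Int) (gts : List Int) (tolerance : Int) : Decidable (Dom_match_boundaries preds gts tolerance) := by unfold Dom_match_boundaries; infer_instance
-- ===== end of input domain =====

-- B replaces A's per-prediction linear scan over all ground truths by a value-sorted list of
-- (index, gt) pairs with binary search for the two nearest remaining values (objective: faster, measured).

-- ===== PORT A =====
def match_boundaries (preds : List Int) (gts : List Int) (tolerance : Int) : List (String × Int) :=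
  let st := preds.foldl
    (fun (st : PySem.Set Int × Int) pred =>
      let inner := (PySem.List.enumerate gts).foldl
        (fun (acc : Option Int × Int) p =>
          if PySem.Set.contains st.1 p.1 then acc
          else
            let diff := |pred - p.2|
            if diff ≤ tolerance ∧ diff < acc.2 then (some p.1, diff) else acc)
        (none, tolerance + 1)
      match inner.1 with
      | some i => (PySem.Set.add st.1 i, st.2 + 1)
      | none => st)
    (PySem.Set.empty, 0)
  [("tp", st.2), ("fp", (preds.length : Int) - st.2), ("fn", (gts.length : Int) - st.2)]

-- ===== PORT B =====
-- binary search of Source B's _first_ge: first position p in [lo, hi] with arr[p].2 ≥ t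
def firstGe (arr : List (Int × Int)) (t : Int) (lo hi : Int) : Int :=
  if h : lo < hi then
    match PySem.List.pyGet? arr (PySem.Int.floordiv (lo + hi) 2) with
    | some p =>
      if p.2 < t then firstGe arr t (PySem.Int.floordiv (lo + hi) 2 + 1) hi
      else firstGe arr t lo (PySem.Int.floordiv (lo + hi) 2)
    | none => lo  -- unreachable for 0 ≤ lo, hi ≤ len (Python indexing always in range here)
  else lo
termination_by (hi - lo).toNat
decreasing_by
  · have h1 := (PySem.Int.le_floordiv_iff_mul_le (a := lo + hi) (b := 2) (q := lo) (by omega)).mpr (by omega)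
    omega
  · have h2 := (PySem.Int.floordiv_lt_iff_lt_mul (a := lo + hi) (b := 2) (q := hi) (by omega)).mpr (by omega)
    have h1 := (PySem.Int.le_floordiv_iff_mul_le (a := lo + hi) (b := 2) (q := lo) (by omega)).mpr (by omega)
    omega

-- port of Python's min() over the candidate triples: running minimum, strict-less replacement
def pyLt3 (a b : Int × Int × Int) : Bool :=
  a.1 < b.1 || (a.1 == b.1 && (a.2.1 < b.2.1 || (a.2.1 == b.2.1 && a.2.2 < b.2.2)))

def pyMinT : List (Int × Int × Int) → Option (Int × Int × Int)
  | [] => none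
  | x :: xs => some (xs.foldl (fun m y => if pyLt3 y m then y else m) x)

-- Source B's loop body: nearest remaining gt via binary search on the value-sorted pair list
def altStep (tolerance : Int) (st : List (Int × Int) × Int) (pred : Int) : List (Int × Int) × Int :=
  let arr := st.1
  let lo := firstGe arr pred 0 (arr.length : Int)
  let cand : List (Int × Int × Int) :=
    (if lo < (arr.length : Int) then
       match PySem.List.pyGet? arr lo with
       | some p => [(p.2 - pred, p.1, lo)]
       | none => []  -- unreachable: 0 ≤ lo < len
     else []) ++
    (if 0 < lo then
       match PySem.List.pyGet? arr (lo - 1) with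
       | some q =>
         let pp := firstGe arr q.2 0 (lo - 1)
         match PySem.List.pyGet? arr pp with
         | some r => [(pred - r.2, r.1, pp)]
         | none => []  -- unreachable
       | none => []  -- unreachable
     else [])
  match pyMinT cand with
  | some m =>
    if m.1 ≤ tolerance then
      (PySem.List.slice arr none (some m.2.2) ++ PySem.List.slice arr (some (m.2.2 + 1)) none, st.2 + 1)
    else st
  | none => st

def match_boundaries_alt (preds : List Int) (gts : List Int) (tolerance : Int) : List (String × Int) :=
  let st := preds.foldl (altStep tolerance)
    (PySem.List.sorted (PySem.List.enumerate gts) (fun p => p.2) false, 0)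
  [("tp", st.2), ("fp", (preds.length : Int) - st.2), ("fn", (gts.length : Int) - st.2)]

-- ===== PRECONDITION & SPEC =====
def Spec_match_boundaries (preds : List Int) (gts : List Int) (tolerance : Int) (out : List (String × Int)) : Prop := out = match_boundaries_alt preds gts tolerance
instance (preds : List Int) (gts : List Int) (tolerance : Int) (out : List (String × Int)) : Decidable (Spec_match_boundaries preds gts tolerance out) := by unfold Spec_match_boundaries; infer_instance

-- ===== CLAIM (what is proved, stated in full; the proofs are below) =====
def Claim_equal_match_boundaries : Prop := ∀ (preds : List Int) (gts : List Int) (tolerance : Int), Dom_match_boundaries preds gts tolerance → Spec_match_boundaries preds gts tolerance (match_boundaries preds gts tolerance)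

-- ===== LEMMAS AND PROOFS =====

-- strict lexicographic order on (value, index) pairs of the remaining list
def pvLexLt (p q : Int × Int) : Prop := p.2 < q.2 ∨ (p.2 = q.2 ∧ p.1 < q.1)

-- non-strict lexicographic order on (diff, index) keys
def pvLeLex (a b : Int × Int) : Prop := a.1 < b.1 ∨ (a.1 = b.1 ∧ a.2 ≤ b.2)

-- A's inner-loop step (after the matched-set skip has been removed by filtering)
def pvStepA (tol pred : Int) (acc : Option Int × Int) (p : Int × Int) : Option Int × Int :=
  if |pred - p.2| ≤ tol ∧ |pred - p.2| < acc.2 then (some p.1, |pred - p.2|) else acc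

-- reference result of one greedy step: (best diff, its gt index) on the remaining list, or none
def pvBetter (dp i : Int) : Option (Int × Int) → Int × Int
  | none => (dp, i)
  | some dj => if dj.1 < dp then dj else (dp, i)

def bestOf (tol pred : Int) : List (Int × Int) → Option (Int × Int)
  | [] => none
  | p :: L =>
    if |pred - p.2| ≤ tol then some (pvBetter (|pred - p.2|) p.1 (bestOf tol pred L))
    else bestOf tol pred L

-- reference step shared by both proofs
def specStep (tol : Int) (st : List (Int × Int) × Int) (pred : Int) : List (Int × Int) × Int :=
  match bestOf tol pred st.1 with
  | some dj => (st.1.filter (fun p => p.1 ≠ dj.2), st.2 + 1)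
  | none => st

lemma pv_foldl_ext {β α : Type} (f g : β → α → β) (h : ∀ b a, f b a = g b a) :
    ∀ (l : List α) (init : β), l.foldl f init = l.foldl g init := by
  intro l
  induction l with
  | nil => intro init; rfl
  | cons x xs ih => intro init; simp only [List.foldl_cons, h, ih]

-- A's skip over matched indices = a fold over the filtered list
lemma pv_skip_filter (s : PySem.Set Int) (g : (Option Int × Int) → (Int × Int) → (Option Int × Int))
    (L : List (Int × Int)) (init : Option Int × Int) :
    L.foldl (fun acc p => if PySem.Set.contains s p.1 then acc else g acc p) init
      = (L.filter (fun p => !PySem.Set.contains s p.1)).foldl g init := by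
  rw [List.foldl_filter]
  apply pv_foldl_ext
  intro acc p
  by_cases h : PySem.Set.contains s p.1
  · have hm : p.1 ∈ s := by simpa using h
    rw [if_pos h, if_neg (by simp [hm])]
  · have hm : p.1 ∉ s := by simpa using h
    rw [if_neg h, if_pos (by simp [hm])]

lemma bestOf_mem (tol pred : Int) :
    ∀ (L : List (Int × Int)) (d j : Int), bestOf tol pred L = some (d, j) →
      ∃ g, (j, g) ∈ L ∧ d = |pred - g| ∧ d ≤ tol := by
  intro L
  induction L with
  | nil => intro d j h; simp [bestOf] at h
  | cons p L ih =>
    intro d j h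
    simp only [bestOf] at h
    by_cases hp : |pred - p.2| ≤ tol
    · rw [if_pos hp] at h
      have hbv := Option.some.inj h
      cases hr : bestOf tol pred L with
      | none =>
        rw [hr] at hbv
        simp only [pvBetter] at hbv
        simp only [Prod.mk.injEq] at hbv
        obtain ⟨hd, hj⟩ := hbv
        exact ⟨p.2, by rw [← hj]; simp, hd.symm, hd ▸ hp⟩
      | some dj =>
        rw [hr] at hbv
        simp only [pvBetter] at hbv
        by_cases hlt : dj.1 < |pred - p.2|
        · rw [if_pos hlt] at hbv
          obtain ⟨g, hg, hd, hdt⟩ := ih d j (by rw [hr, hbv])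
          exact ⟨g, List.mem_cons_of_mem _ hg, hd, hdt⟩
        · rw [if_neg hlt] at hbv
          simp only [Prod.mk.injEq] at hbv
          obtain ⟨hd, hj⟩ := hbv
          exact ⟨p.2, by rw [← hj]; simp, hd.symm, hd ▸ hp⟩
    · rw [if_neg hp] at h
      obtain ⟨g, hg, hd, hdt⟩ := ih d j h
      exact ⟨g, List.mem_cons_of_mem _ hg, hd, hdt⟩

lemma bestOf_none (tol pred : Int) :
    ∀ (L : List (Int × Int)), bestOf tol pred L = none →
      ∀ p ∈ L, ¬ (|pred - p.2| ≤ tol) := by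
  intro L
  induction L with
  | nil => intro _ p hp; simp at hp
  | cons q L ih =>
    intro h p hp
    simp only [bestOf] at h
    by_cases hq : |pred - q.2| ≤ tol
    · rw [if_pos hq] at h; simp at h
    · rw [if_neg hq] at h
      rcases List.mem_cons.mp hp with hpq | hpL
      · rw [hpq]; exact hq
      · exact ih h p hpL

lemma bestOf_min (tol pred : Int) :
    ∀ (L : List (Int × Int)), L.Pairwise (fun p q => p.1 < q.1) →
      ∀ d j, bestOf tol pred L = some (d, j) →
      ∀ p ∈ L, |pred - p.2| ≤ tol → pvLeLex (d, j) (|pred - p.2|, p.1) := by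
  intro L
  induction L with
  | nil => intro _ d j h; simp [bestOf] at h
  | cons q L ih =>
    intro hpw d j h p hp hptol
    have hqL : ∀ r ∈ L, q.1 < r.1 := (List.pairwise_cons.mp hpw).1
    have hpwL : L.Pairwise (fun p q => p.1 < q.1) := hpw.of_cons
    simp only [bestOf] at h
    by_cases hq : |pred - q.2| ≤ tol
    · rw [if_pos hq] at h
      have hbv := Option.some.inj h
      cases hr : bestOf tol pred L with
      | none =>
        rw [hr] at hbv
        simp only [pvBetter] at hbv
        simp only [Prod.mk.injEq] at hbv
        obtain ⟨hd, hj⟩ := hbv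
        rcases List.mem_cons.mp hp with hpq | hpL
        · subst hpq; exact Or.inr ⟨hd.symm, by rw [← hj]⟩
        · exact absurd hptol (bestOf_none tol pred L hr p hpL)
      | some dj =>
        rw [hr] at hbv
        simp only [pvBetter] at hbv
        by_cases hlt : dj.1 < |pred - q.2|
        · rw [if_pos hlt] at hbv
          rcases List.mem_cons.mp hp with hpq | hpL
          · subst hpq
            rw [← hbv]
            exact Or.inl hlt
          · have := ih hpwL dj.1 dj.2 hr p hpL hptol
            rw [← hbv]
            exact this
        · rw [if_neg hlt] at hbv
          simp only [Prod.mk.injEq] at hbv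
          obtain ⟨hd, hj⟩ := hbv
          push_neg at hlt
          rcases List.mem_cons.mp hp with hpq | hpL
          · subst hpq; exact Or.inr ⟨hd.symm, by rw [← hj]⟩
          · have hih := ih hpwL dj.1 dj.2 hr p hpL hptol
            have hq1 := hqL p hpL
            rw [← hd, ← hj]
            rcases hih with hlt2 | ⟨he1, _⟩
            · exact Or.inl (lt_of_le_of_lt hlt hlt2)
            · rcases lt_or_eq_of_le hlt with hx | hx
              · exact Or.inl (by rw [← he1]; exact hx)
              · exact Or.inr ⟨by rw [hx, he1], le_of_lt hq1⟩
    · rw [if_neg hq] at h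
      rcases List.mem_cons.mp hp with hpq | hpL
      · subst hpq; exact absurd hptol hq
      · exact ih hpwL d j h p hpL hptol

lemma bestOf_unique (tol pred : Int) (L : List (Int × Int))
    (hpw : L.Pairwise (fun p q => p.1 < q.1)) (j g : Int)
    (hmem : (j, g) ∈ L) (htol : |pred - g| ≤ tol)
    (hmin : ∀ p ∈ L, |pred - p.2| ≤ tol → pvLeLex (|pred - g|, j) (|pred - p.2|, p.1)) :
    bestOf tol pred L = some (|pred - g|, j) := by
  cases hb : bestOf tol pred L with
  | none => exact absurd htol (bestOf_none tol pred L hb (j, g) hmem)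
  | some dj =>
    obtain ⟨g0, hg0, hd0, hdt0⟩ := bestOf_mem tol pred L dj.1 dj.2 (by rw [hb])
    have h1 := bestOf_min tol pred L hpw dj.1 dj.2 (by rw [hb]) (j, g) hmem htol
    have h2 := hmin (dj.2, g0) hg0 (by rw [← hd0]; exact hdt0)
    simp only [pvLeLex] at h1 h2
    rw [← hd0] at h2
    have hde : dj.1 = |pred - g| := by
      rcases h1 with h | h
      · rcases h2 with h' | h'
        · exact absurd h' (not_lt.mpr (le_of_lt h))
        · exact h'.1.symm
      · exact h.1
    have hje : dj.2 = j := by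
      rcases h1 with h | h
      · rcases h2 with h' | h'
        · exact absurd h' (not_lt.mpr (le_of_lt h))
        · exact absurd h (by rw [h'.1]; exact lt_irrefl _)
      · rcases h2 with h' | h'
        · exact absurd h' (by rw [h.1]; exact lt_irrefl _)
        · exact le_antisymm h.2 h'.2
    exact congrArg some (Prod.ext hde hje)

-- A's inner fold computes the reference best (merged over the sentinel accumulator)
def pvMerge (acc : Option Int × Int) : Option (Int × Int) → Option Int × Int
  | none => acc
  | some dj => if dj.1 < acc.2 then (some dj.2, dj.1) else acc

lemma foldA_merge (tol pred : Int) :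
    ∀ (L : List (Int × Int)) (acc : Option Int × Int),
      (acc.1 = none → acc.2 = tol + 1) → (∀ j, acc.1 = some j → acc.2 ≤ tol) →
      L.foldl (pvStepA tol pred) acc = pvMerge acc (bestOf tol pred L) := by
  intro L
  induction L with
  | nil => intro acc _ _; rfl
  | cons p L ih =>
    intro acc hn hs
    simp only [List.foldl_cons, bestOf]
    by_cases hp : |pred - p.2| ≤ tol
    · rw [if_pos hp]
      by_cases hlt : |pred - p.2| < acc.2
      · have hstep : pvStepA tol pred acc p = (some p.1, |pred - p.2|) := by
          simp only [pvStepA]; rw [if_pos ⟨hp, hlt⟩]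
        rw [hstep, ih _ (by simp) (by intro j h; simpa using hp)]
        cases hr : bestOf tol pred L with
        | none => simp only [pvBetter, pvMerge]; rw [if_pos hlt]
        | some dj =>
          by_cases h2 : dj.1 < |pred - p.2|
          · simp only [pvBetter]
            rw [if_pos h2]
            simp only [pvMerge]
            rw [if_pos h2, if_pos (lt_trans h2 hlt)]
          · simp only [pvBetter]
            rw [if_neg h2]
            simp only [pvMerge]
            rw [if_neg h2, if_pos hlt]
      · have hstep : pvStepA tol pred acc p = acc := by
          simp only [pvStepA]; rw [if_neg (fun hh => hlt hh.2)]
        rw [hstep, ih _ hn hs]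
        have hbd : acc.2 ≤ tol := by
          cases hacc : acc.1 with
          | none => exact absurd (show |pred - p.2| < acc.2 by rw [hn hacc]; exact Int.lt_add_one_iff.mpr hp) hlt
          | some j => exact hs j hacc
        cases hr : bestOf tol pred L with
        | none =>
          simp only [pvBetter, pvMerge]
          rw [if_neg hlt]
        | some dj =>
          by_cases h2 : dj.1 < |pred - p.2|
          · simp only [pvBetter]
            rw [if_pos h2]
          · simp only [pvBetter]
            rw [if_neg h2]
            simp only [pvMerge]
            push_neg at h2 hlt
            rw [if_neg (not_lt.mpr (le_trans hlt h2)), if_neg (not_lt.mpr hlt)]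
    · rw [if_neg hp]
      have hstep : pvStepA tol pred acc p = acc := by
        simp only [pvStepA]; rw [if_neg (fun hh => hp hh.1)]
      rw [hstep, ih _ hn hs]

lemma foldA_eq_bestOf (tol pred : Int) (L : List (Int × Int)) :
    L.foldl (pvStepA tol pred) (none, tol + 1)
      = match bestOf tol pred L with
        | none => (none, tol + 1)
        | some dj => (some dj.2, dj.1) := by
  rw [foldA_merge tol pred L (none, tol + 1) (by simp) (by simp)]
  cases hr : bestOf tol pred L with
  | none => rfl
  | some dj =>
    obtain ⟨g0, _, _, hdt0⟩ := bestOf_mem tol pred L dj.1 dj.2 (by rw [hr])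
    simp only [pvMerge]
    rw [if_pos (Int.lt_add_one_iff.mpr hdt0)]

-- ===== A-side: the port of A computes the reference fold =====
lemma pv_outerA (gts : List Int) (tol : Int) :
    ∀ (preds : List Int) (s : PySem.Set Int) (t : Int),
      (preds.foldl
        (fun (st : PySem.Set Int × Int) pred =>
          let inner := (PySem.List.enumerate gts).foldl
            (fun (acc : Option Int × Int) p =>
              if PySem.Set.contains st.1 p.1 then acc
              else
                let diff := |pred - p.2|
                if diff ≤ tol ∧ diff < acc.2 then (some p.1, diff) else acc)
            (none, tol + 1)
          match inner.1 with
          | some i => (PySem.Set.add st.1 i, st.2 + 1)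
          | none => st) (s, t)).2
      = (preds.foldl (specStep tol)
          ((PySem.List.enumerate gts).filter (fun p => !PySem.Set.contains s p.1), t)).2 := by
  intro preds
  induction preds with
  | nil => intro s t; rfl
  | cons pred preds ih =>
    intro s t
    simp only [List.foldl_cons]
    set rem := (PySem.List.enumerate gts).filter (fun p => !PySem.Set.contains s p.1) with hrem
    have hskip := pv_skip_filter s (pvStepA tol pred) (PySem.List.enumerate gts) (none, tol + 1)
    have hinner :
        (PySem.List.enumerate gts).foldl
          (fun (acc : Option Int × Int) p =>
            if PySem.Set.contains s p.1 then acc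
            else
              let diff := |pred - p.2|
              if diff ≤ tol ∧ diff < acc.2 then (some p.1, diff) else acc)
          (none, tol + 1)
        = rem.foldl (pvStepA tol pred) (none, tol + 1) := by
      rw [← hskip]; rfl
    rw [hinner, foldA_eq_bestOf]
    cases hb : bestOf tol pred rem with
    | none =>
      simp only [specStep, hb]
      exact ih s t
    | some dj =>
      obtain ⟨g, hg, _, _⟩ := bestOf_mem tol pred rem dj.1 dj.2 (by rw [hb])
      have hfresh : PySem.Set.contains s dj.2 = false := by
        have := (List.mem_filter.mp (hrem ▸ hg)).2
        simpa using this
      simp only [specStep, hb]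
      have hadd : PySem.Set.add s dj.2 = s ++ [dj.2] := by
        simp only [PySem.Set.add]; rw [if_neg (by rw [hfresh]; simp)]
      have hnext : (PySem.List.enumerate gts).filter
            (fun p => !PySem.Set.contains (PySem.Set.add s dj.2) p.1)
          = rem.filter (fun p => p.1 ≠ dj.2) := by
        rw [hadd, hrem, List.filter_filter]
        apply List.filter_congr
        intro p _
        show (!PySem.Set.contains (s ++ [dj.2]) p.1)
            = (decide (p.1 ≠ dj.2) && !PySem.Set.contains s p.1)
        simp only [PySem.Set.contains, List.contains_append, List.contains_cons,
          List.contains_nil, Bool.or_false, Bool.not_or]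
        cases hbe : (p.1 == dj.2) <;> cases hcs : List.contains s p.1 <;> simp_all
      have := ih (PySem.Set.add s dj.2) (t + 1)
      rw [hnext] at this
      exact this

-- ===== B-side =====

-- stability of Python's sort: on an index-increasing pair list, sorting by value is strictly
-- (value, index)-lexicographically increasing
lemma pv_insertBy_lex (x : Int × Int) (acc : List (Int × Int))
    (hacc : acc.Pairwise pvLexLt) (hx : ∀ a ∈ acc, a.1 < x.1) :
    (PySem.List.insertBy (fun a b => decide (a.2 < b.2)) x acc).Pairwise pvLexLt := by
  induction acc with
  | nil => simp [PySem.List.insertBy]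
  | cons y ys ih =>
    simp only [PySem.List.insertBy]
    by_cases h : y.2 ≤ x.2
    · rw [if_neg (by simpa using not_lt.mpr h)]
      refine List.pairwise_cons.mpr ⟨?_, ih hacc.of_cons (fun a ha => hx a (List.mem_cons_of_mem _ ha))⟩
      intro z hz
      rcases (PySem.List.insertBy_mem_iff _ _ _ _).mp hz with hzx | hzy
      · subst hzx
        rcases lt_or_eq_of_le h with h' | h'
        · exact Or.inl h'
        · exact Or.inr ⟨h', hx y (by simp)⟩
      · exact (List.pairwise_cons.mp hacc).1 z hzy
    · push_neg at h
      rw [if_pos (by simpa using h)]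
      refine List.pairwise_cons.mpr ⟨?_, hacc⟩
      intro z hz
      rcases List.mem_cons.mp hz with hzy | hzys
      · subst hzy; exact Or.inl h
      · have := (List.pairwise_cons.mp hacc).1 z hzys
        rcases this with h2 | ⟨h2, _⟩
        · exact Or.inl (lt_trans h h2)
        · exact Or.inl (h2 ▸ h)

lemma pv_sorted_fold_lex :
    ∀ (xs acc : List (Int × Int)),
      acc.Pairwise pvLexLt → (∀ a ∈ acc, ∀ b ∈ xs, a.1 < b.1) →
      xs.Pairwise (fun p q => p.1 < q.1) →
      (xs.foldl (fun acc x => PySem.List.insertBy (fun a b => decide (a.2 < b.2)) x acc) acc).Pairwise pvLexLt := by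
  intro xs
  induction xs with
  | nil => intro acc h _ _; exact h
  | cons x xs ih =>
    intro acc hacc hcross hpw
    simp only [List.foldl_cons]
    apply ih
    · exact pv_insertBy_lex x acc hacc (fun a ha => hcross a ha x (by simp))
    · intro a ha b hb
      rcases (PySem.List.insertBy_mem_iff _ _ _ _).mp ha with hax | haacc
      · subst hax; exact (List.pairwise_cons.mp hpw).1 b hb
      · exact hcross a haacc b (List.mem_cons_of_mem _ hb)
    · exact hpw.of_cons

lemma pv_sorted_lex (xs : List (Int × Int)) (hx : xs.Pairwise (fun p q => p.1 < q.1)) :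
    (PySem.List.sorted xs (fun p => p.2) false).Pairwise pvLexLt := by
  rw [PySem.List.sorted_eq_foldl_insertBy]
  exact pv_sorted_fold_lex xs [] (by simp) (by simp) hx

-- binary search boundary spec
lemma firstGe_spec (arr : List (Int × Int)) (t : Int) :
    ∀ (n : Nat) (lo hi : Int), (hi - lo).toNat = n → 0 ≤ lo → lo ≤ hi → hi ≤ (arr.length : Int) →
      lo ≤ firstGe arr t lo hi ∧ firstGe arr t lo hi ≤ hi ∧
      (lo < firstGe arr t lo hi →
        (PySem.List.pyGetD arr (firstGe arr t lo hi - 1) ((0 : Int), (0 : Int))).2 < t) ∧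
      (firstGe arr t lo hi < hi →
        t ≤ (PySem.List.pyGetD arr (firstGe arr t lo hi) ((0 : Int), (0 : Int))).2) := by
  intro n
  induction n using Nat.strong_induction_on with
  | _ n ihn =>
    intro lo hi hn h0 hlh hhl
    by_cases h : lo < hi
    · have hmid1 := (PySem.Int.le_floordiv_iff_mul_le (a := lo + hi) (b := 2) (q := lo) (by omega)).mpr (by omega)
      have hmid2 := (PySem.Int.floordiv_lt_iff_lt_mul (a := lo + hi) (b := 2) (q := hi) (by omega)).mpr (by omega)
      rw [firstGe, dif_pos h]
      set mid := PySem.Int.floordiv (lo + hi) 2 with hmiddef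
      have hmidrange : mid.toNat < arr.length := by omega
      have hget : PySem.List.pyGet? arr mid = some arr[mid.toNat] := by
        have he : PySem.List.pyGet? arr mid = arr[mid.toNat]? := by
          conv_lhs => rw [show mid = ((mid.toNat : Nat) : Int) from by omega]
          exact PySem.List.pyGet?_natCast arr mid.toNat
        rw [he, List.getElem?_eq_getElem hmidrange]
      rw [hget]
      rw [show (match (some arr[mid.toNat] : Option (Int × Int)) with
            | some p => if p.2 < t then firstGe arr t (mid + 1) hi else firstGe arr t lo mid
            | none => lo)
          = if (arr[mid.toNat]).2 < t then firstGe arr t (mid + 1) hi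
            else firstGe arr t lo mid from rfl]
      have hgd : PySem.List.pyGetD arr mid ((0 : Int), (0 : Int)) = arr[mid.toNat] :=
        PySem.List.pyGetD_eq_getElem arr _ (by omega) (by omega)
      by_cases hc : (arr[mid.toNat]).2 < t
      · rw [if_pos hc]
        have hrec := ihn (hi - (mid + 1)).toNat (by omega) (mid + 1) hi rfl (by omega) (by omega) hhl
        obtain ⟨r1, r2, r3, r4⟩ := hrec
        refine ⟨by omega, r2, ?_, r4⟩
        intro hlt
        by_cases he : mid + 1 < firstGe arr t (mid + 1) hi
        · exact r3 he
        · have hre : firstGe arr t (mid + 1) hi = mid + 1 := by omega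
          rw [hre, show (mid + 1 - 1 : Int) = mid from by ring, hgd]
          exact hc
      · rw [if_neg hc]
        have hrec := ihn (mid - lo).toNat (by omega) lo mid rfl h0 (by omega) (by omega)
        obtain ⟨r1, r2, r3, r4⟩ := hrec
        refine ⟨r1, by omega, r3, ?_⟩
        intro hlt
        by_cases he : firstGe arr t lo mid < mid
        · exact r4 he
        · have hre : firstGe arr t lo mid = mid := by omega
          rw [hre, hgd]
          exact not_lt.mp hc
    · rw [firstGe, dif_neg h]
      exact ⟨le_refl _, hlh, fun hcon => absurd hcon (lt_irrefl _),
        fun hcon => absurd hcon (by omega)⟩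

-- index keys are injective on an index-increasing list
lemma pv_idx_inj (L : List (Int × Int)) (h : L.Pairwise (fun p q => p.1 < q.1)) :
    ∀ p ∈ L, ∀ q ∈ L, p.1 = q.1 → p = q := by
  induction L with
  | nil => intro p hp; simp at hp
  | cons x L ih =>
    intro p hp q hq he
    have hx := (List.pairwise_cons.mp h).1
    rcases List.mem_cons.mp hp with hpx | hpL <;> rcases List.mem_cons.mp hq with hqx | hqL
    · rw [hpx, hqx]
    · exfalso; have := hx q hqL; rw [hpx] at he; omega
    · exfalso; have := hx p hpL; rw [hqx] at he; omega
    · exact ih h.of_cons p hpL q hqL he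

lemma pv_mem_eraseIdx (arr : List (Int × Int)) (hnd : arr.Nodup) (k : Nat) (hk : k < arr.length) :
    ∀ p, p ∈ arr.eraseIdx k ↔ p ∈ arr ∧ p ≠ arr[k] := by
  intro p
  rw [List.eraseIdx_eq_take_drop_succ]
  constructor
  · intro hp
    rcases List.mem_append.mp hp with h1 | h1
    · refine ⟨List.mem_of_mem_take h1, ?_⟩
      intro he
      have hidx := List.mem_take_iff_getElem.mp h1
      obtain ⟨i, hi, hpe⟩ := hidx
      have hilen : i < arr.length := lt_of_lt_of_le (lt_min_iff.mp hi).1 (le_of_lt hk)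
      have : arr[i] = arr[k] := by rw [hpe, he]
      have := List.Nodup.getElem_inj_iff hnd |>.mp this
      omega
    · refine ⟨List.mem_of_mem_drop h1, ?_⟩
      intro he
      have := List.mem_drop_iff_getElem.mp h1
      obtain ⟨i, hi, hpe⟩ := this
      have : arr[k + 1 + i] = arr[k] := by rw [hpe, he]
      have := List.Nodup.getElem_inj_iff hnd |>.mp this
      omega
  · rintro ⟨hp, hne⟩
    obtain ⟨i, hi, hpe⟩ := List.mem_iff_getElem.mp hp
    rcases lt_trichotomy i k with hik | hik | hik
    · apply List.mem_append.mpr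
      left
      apply List.mem_take_iff_getElem.mpr
      exact ⟨i, by omega, hpe⟩
    · subst hik; exact absurd hpe.symm hne
    · apply List.mem_append.mpr
      right
      apply List.mem_drop_iff_getElem.mpr
      exact ⟨i - (k + 1), by omega, by rw [← hpe]; congr 1; omega⟩

-- value-monotonicity along the sorted remaining list
lemma pv_lex_mono (arr : List (Int × Int)) (h : arr.Pairwise pvLexLt)
    (i j : Nat) (hi : i < arr.length) (hj : j < arr.length) (hij : i ≤ j) :
    (arr[i]).2 ≤ (arr[j]).2 := by
  rcases lt_or_eq_of_le hij with h' | h'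
  · have := List.pairwise_iff_getElem.mp h i j hi hj h'
    rcases this with h2 | ⟨h2, _⟩
    · exact le_of_lt h2
    · exact le_of_eq h2
  · subst h'; exact le_refl _

-- Python indexing in range
lemma pv_pyGet_in (arr : List (Int × Int)) (i : Int) (h0 : 0 ≤ i) (hk : i.toNat < arr.length) :
    PySem.List.pyGet? arr i = some arr[i.toNat] := by
  have he : PySem.List.pyGet? arr i = arr[i.toNat]? := by
    conv_lhs => rw [show i = ((i.toNat : Nat) : Int) from by omega]
    exact PySem.List.pyGet?_natCast arr i.toNat
  rw [he, List.getElem?_eq_getElem hk]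

lemma pv_leLex_refl (a : Int × Int) : pvLeLex a a := Or.inr ⟨rfl, le_refl _⟩

lemma pv_leLex_trans {a b c : Int × Int} (h1 : pvLeLex a b) (h2 : pvLeLex b c) : pvLeLex a c := by
  simp only [pvLeLex] at h1 h2 ⊢
  omega

lemma pv_lt3_le (a b : Int × Int × Int) (h : pyLt3 a b = true) : pvLeLex (a.1, a.2.1) (b.1, b.2.1) := by
  simp only [pyLt3, Bool.or_eq_true, Bool.and_eq_true, decide_eq_true_eq, beq_iff_eq] at h
  simp only [pvLeLex]
  omega

lemma pv_lt3_ge (a b : Int × Int × Int) (h : pyLt3 a b = false) : pvLeLex (b.1, b.2.1) (a.1, a.2.1) := by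
  have h' : ¬ (a.1 < b.1 ∨ (a.1 = b.1 ∧ (a.2.1 < b.2.1 ∨ (a.2.1 = b.2.1 ∧ a.2.2 < b.2.2)))) := by
    intro hc
    have : pyLt3 a b = true := by
      simp only [pyLt3, Bool.or_eq_true, Bool.and_eq_true, decide_eq_true_eq, beq_iff_eq]
      exact hc
    rw [h] at this
    exact Bool.false_ne_true this
  simp only [pvLeLex]
  omega

-- the first remaining pair with value ≥ pred is lexicographically minimal among those
lemma pv_succ_min (pred lo : Int) (arr : List (Int × Int)) (h1 : arr.Pairwise pvLexLt)
    (hG1 : ∀ (k : Nat) (hk : k < arr.length), (k : Int) < lo → (arr[k]).2 < pred)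
    (hkm : lo.toNat < arr.length) (hlo0 : 0 ≤ lo)
    (k : Nat) (hk : k < arr.length) (hkp : pred ≤ (arr[k]).2) :
    pvLeLex ((arr[lo.toNat]).2 - pred, (arr[lo.toNat]).1) (|pred - (arr[k]).2|, (arr[k]).1) := by
  have hklo : lo ≤ (k : Int) := by
    by_contra hc
    push_neg at hc
    have := hG1 k hk hc
    omega
  have habs : |pred - (arr[k]).2| = (arr[k]).2 - pred := by
    rw [abs_sub_comm]
    exact abs_of_nonneg (by omega)
  rw [habs]
  simp only [pvLeLex]
  have hle : lo.toNat ≤ k := by omega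
  rcases lt_or_eq_of_le hle with hlt | heq
  · have hlex := List.pairwise_iff_getElem.mp h1 lo.toNat k hkm hk hlt
    rcases hlex with hv | ⟨hv, hi⟩
    · left; omega
    · right; exact ⟨by omega, le_of_lt hi⟩
  · subst heq
    right
    exact ⟨rfl, le_refl _⟩

-- the first remaining pair carrying the largest value < pred is lexicographically minimal among those
lemma pv_pred_min (pred lo pp : Int) (arr : List (Int × Int)) (h1 : arr.Pairwise pvLexLt)
    (hG1 : ∀ (k : Nat) (hk : k < arr.length), (k : Int) < lo → (arr[k]).2 < pred)
    (hG2 : ∀ (k : Nat) (hk : k < arr.length), lo ≤ (k : Int) → pred ≤ (arr[k]).2)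
    (hpp0 : 0 ≤ pp) (hpp1 : pp ≤ lo - 1)
    (hqk : (lo - 1).toNat < arr.length) (hppk : pp.toNat < arr.length)
    (hppv : (arr[pp.toNat]).2 = (arr[(lo - 1).toNat]).2)
    (hGP1 : ∀ (k : Nat) (hk : k < arr.length), (k : Int) < pp → (arr[k]).2 < (arr[(lo - 1).toNat]).2)
    (k : Nat) (hk : k < arr.length) (hkp : (arr[k]).2 < pred) :
    pvLeLex (pred - (arr[pp.toNat]).2, (arr[pp.toNat]).1) (|pred - (arr[k]).2|, (arr[k]).1) := by
  have hklo : (k : Int) < lo := by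
    by_contra hc
    push_neg at hc
    have := hG2 k hk hc
    omega
  have hkle : k ≤ (lo - 1).toNat := by omega
  have hmono := pv_lex_mono arr h1 k ((lo - 1).toNat) hk hqk hkle
  have habs : |pred - (arr[k]).2| = pred - (arr[k]).2 := abs_of_nonneg (by omega)
  rw [habs]
  simp only [pvLeLex]
  rcases lt_or_eq_of_le hmono with hlt | heq
  · left; omega
  · have hkpp : pp.toNat ≤ k := by
      by_contra hc
      push_neg at hc
      have := hGP1 k hk (by omega)
      omega
    rcases lt_or_eq_of_le hkpp with hlt2 | heq2
    · have hlex := List.pairwise_iff_getElem.mp h1 pp.toNat k hppk hk hlt2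
      rcases hlex with hv | ⟨hv, hi⟩
      · left; omega
      · right; exact ⟨by omega, le_of_lt hi⟩
    · subst heq2
      right
      exact ⟨by omega, le_refl _⟩

-- once Source B's chosen candidate is known to be the (diff, index)-minimum, both step results agree
lemma pv_step_conclude (tol pred : Int) (arr rem : List (Int × Int)) (t : Int)
    (h1 : arr.Pairwise pvLexLt) (h2 : ∀ p, p ∈ arr ↔ p ∈ rem)
    (h3 : rem.Pairwise (fun p q => p.1 < q.1)) (hnd : arr.Nodup)
    (m : Int × Int × Int) (km : Nat) (hkm : km < arr.length) (hkmi : m.2.2 = (km : Int))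
    (hat1 : (arr[km]).1 = m.2.1) (hat2 : m.1 = |pred - (arr[km]).2|)
    (hmin : ∀ (k : Nat) (hk : k < arr.length), pvLeLex (m.1, m.2.1) (|pred - (arr[k]).2|, (arr[k]).1)) :
    ((if m.1 ≤ tol then
        (PySem.List.slice arr none (some m.2.2) ++ PySem.List.slice arr (some (m.2.2 + 1)) none, t + 1)
      else (arr, t)).2 = (specStep tol (rem, t) pred).2) ∧
    (if m.1 ≤ tol then
        (PySem.List.slice arr none (some m.2.2) ++ PySem.List.slice arr (some (m.2.2 + 1)) none, t + 1)
      else (arr, t)).1.Pairwise pvLexLt ∧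
    (∀ p, p ∈ (if m.1 ≤ tol then
        (PySem.List.slice arr none (some m.2.2) ++ PySem.List.slice arr (some (m.2.2 + 1)) none, t + 1)
      else (arr, t)).1 ↔ p ∈ (specStep tol (rem, t) pred).1) ∧
    (specStep tol (rem, t) pred).1.Pairwise (fun p q => p.1 < q.1) := by
  have hg : arr[km] = (m.2.1, (arr[km]).2) := Prod.ext hat1 rfl
  have hmemA : arr[km] ∈ arr := List.mem_iff_getElem.mpr ⟨km, hkm, rfl⟩
  have hmemR : (m.2.1, (arr[km]).2) ∈ rem := (h2 _).mp (hg ▸ hmemA)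
  have herase : PySem.List.slice arr none (some m.2.2) ++ PySem.List.slice arr (some (m.2.2 + 1)) none
      = arr.eraseIdx km := by
    rw [hkmi, PySem.List.slice_to_natCast]
    rw [show ((km : Int) + 1) = ((km + 1 : Nat) : Int) from by push_cast; ring]
    rw [PySem.List.slice_from_natCast]
    exact (List.eraseIdx_eq_take_drop_succ arr km).symm
  by_cases hmt : m.1 ≤ tol
  · have hbest : bestOf tol pred rem = some (m.1, m.2.1) := by
      have hu := bestOf_unique tol pred rem h3 m.2.1 ((arr[km]).2) hmemR
        (by rw [← hat2]; exact hmt)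
        (fun p hp hptol => by
          obtain ⟨k, hk, hpe⟩ := List.mem_iff_getElem.mp ((h2 p).mpr hp)
          have hmk := hmin k hk
          rw [hpe] at hmk
          rw [← hat2]
          exact hmk)
      rw [← hat2] at hu
      exact hu
    rw [if_pos hmt]
    simp only [specStep, hbest]
    refine ⟨trivial, ?_, ?_, List.Pairwise.sublist List.filter_sublist h3⟩
    · rw [herase]
      exact List.Pairwise.sublist (List.eraseIdx_sublist _ _) h1
    · intro p
      rw [herase, pv_mem_eraseIdx arr hnd km hkm p, List.mem_filter]
      constructor
      · rintro ⟨hpa, hpne⟩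
        refine ⟨(h2 p).mp hpa, ?_⟩
        simp only [decide_eq_true_eq]
        intro hpi
        apply hpne
        have hpeq : p = (m.2.1, (arr[km]).2) :=
          pv_idx_inj rem h3 p ((h2 p).mp hpa) _ hmemR (by rw [hpi])
        rw [hpeq, ← hg]
      · rintro ⟨hpr, hpne⟩
        simp only [decide_eq_true_eq] at hpne
        refine ⟨(h2 p).mpr hpr, ?_⟩
        intro he
        apply hpne
        rw [he]
        exact hat1
  · have hbest : bestOf tol pred rem = none := by
      cases hb : bestOf tol pred rem with
      | none => rfl
      | some dj =>
        obtain ⟨g, hgm, hd, hdt⟩ := bestOf_mem tol pred rem dj.1 dj.2 (by rw [hb])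
        obtain ⟨k, hk, hpe⟩ := List.mem_iff_getElem.mp ((h2 _).mpr hgm)
        have hm := hmin k hk
        rw [hpe] at hm
        exfalso
        apply hmt
        rcases hm with hlt | ⟨heq, _⟩
        · have hx : m.1 < dj.1 := by rw [hd]; exact hlt
          exact le_trans (le_of_lt hx) hdt
        · have hx : m.1 = dj.1 := by rw [heq, hd]
          rw [hx]
          exact hdt
    rw [if_neg hmt]
    simp only [specStep, hbest]
    exact ⟨trivial, h1, h2, h3⟩

-- ===== the main per-step lemma: Source B's loop body = the reference greedy step =====
lemma altStep_spec (tol pred : Int) (arr rem : List (Int × Int)) (t : Int)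
    (h1 : arr.Pairwise pvLexLt)
    (h2 : ∀ p, p ∈ arr ↔ p ∈ rem)
    (h3 : rem.Pairwise (fun p q => p.1 < q.1)) :
    (altStep tol (arr, t) pred).2 = (specStep tol (rem, t) pred).2 ∧
    (altStep tol (arr, t) pred).1.Pairwise pvLexLt ∧
    (∀ p, p ∈ (altStep tol (arr, t) pred).1 ↔ p ∈ (specStep tol (rem, t) pred).1) ∧
    (specStep tol (rem, t) pred).1.Pairwise (fun p q => p.1 < q.1) := by
  have hnelt : ∀ a b : Int × Int, pvLexLt a b → a ≠ b := by
    intro a b hab he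
    subst he
    rcases hab with h | ⟨_, h⟩ <;> exact lt_irrefl _ h
  have hnd : arr.Nodup := List.Pairwise.imp (fun {a b} h => hnelt a b h) h1
  simp only [altStep]
  set lo := firstGe arr pred 0 (arr.length : Int) with hlodef
  have hspec := firstGe_spec arr pred ((arr.length : Int) - 0).toNat 0 (arr.length : Int) rfl
    (le_refl 0) (Int.natCast_nonneg _) (le_refl _)
  rw [← hlodef] at hspec
  clear_value lo
  obtain ⟨hlo0, hlo1, hbd1, hbd2⟩ := hspec
  have hG1 : ∀ (k : Nat) (hk : k < arr.length), (k : Int) < lo → (arr[k]).2 < pred := by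
    intro k hk hklo
    have h0lo : 0 < lo := by omega
    have hplt := hbd1 h0lo
    have hlm : (lo - 1).toNat < arr.length := by omega
    rw [PySem.List.pyGetD_eq_getElem arr _ (by omega) (by omega)] at hplt
    have hmono := pv_lex_mono arr h1 k ((lo - 1).toNat) hk hlm (by omega)
    exact lt_of_le_of_lt hmono hplt
  have hG2 : ∀ (k : Nat) (hk : k < arr.length), lo ≤ (k : Int) → pred ≤ (arr[k]).2 := by
    intro k hk hkge
    have hll : lo < (arr.length : Int) := by omega
    have hpge := hbd2 hll
    have hlm : lo.toNat < arr.length := by omega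
    rw [PySem.List.pyGetD_eq_getElem arr _ (by omega) (by omega)] at hpge
    have hmono := pv_lex_mono arr h1 lo.toNat k hlm hk (by omega)
    exact le_trans hpge hmono
  by_cases hl : lo < (arr.length : Int) <;> by_cases hz : 0 < lo
  · -- both neighbours exist
    have hkm1 : lo.toNat < arr.length := by omega
    have hqk : (lo - 1).toNat < arr.length := by omega
    rw [if_pos hl, if_pos hz, pv_pyGet_in arr lo (by omega) hkm1,
      pv_pyGet_in arr (lo - 1) (by omega) hqk]
    dsimp only
    set pp := firstGe arr ((arr[(lo - 1).toNat]).2) 0 (lo - 1) with hppdef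
    have hspec2 := firstGe_spec arr ((arr[(lo - 1).toNat]).2) ((lo - 1) - 0).toNat 0 (lo - 1) rfl
      (le_refl 0) (by omega) (by omega)
    rw [← hppdef] at hspec2
    clear_value pp
    obtain ⟨hpp0, hpp1, hppb1, hppb2⟩ := hspec2
    have hppk : pp.toNat < arr.length := by omega
    rw [pv_pyGet_in arr pp hpp0 hppk]
    dsimp only
    have hvlo : pred ≤ (arr[lo.toNat]).2 := hG2 lo.toNat hkm1 (by omega)
    have hvq : (arr[(lo - 1).toNat]).2 < pred := hG1 ((lo - 1).toNat) hqk (by omega)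
    have hppv : (arr[pp.toNat]).2 = (arr[(lo - 1).toNat]).2 := by
      have hmono := pv_lex_mono arr h1 pp.toNat ((lo - 1).toNat) hppk hqk (by omega)
      rcases lt_or_eq_of_le hmono with hlt | heq
      · exfalso
        have hplt : pp < lo - 1 := by
          by_contra hc
          push_neg at hc
          have hee : pp.toNat = (lo - 1).toNat := by omega
          simp only [hee] at hlt
          exact lt_irrefl _ hlt
        have hpge := hppb2 hplt
        rw [PySem.List.pyGetD_eq_getElem arr _ (by omega) (by omega)] at hpge
        omega
      · exact heq
    have hGP1 : ∀ (k : Nat) (hk : k < arr.length), (k : Int) < pp →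
        (arr[k]).2 < (arr[(lo - 1).toNat]).2 := by
      intro k hk hkpp
      have h0pp : 0 < pp := by omega
      have hplt := hppb1 h0pp
      have hpm : (pp - 1).toNat < arr.length := by omega
      rw [PySem.List.pyGetD_eq_getElem arr _ (by omega) (by omega)] at hplt
      have hmono := pv_lex_mono arr h1 k ((pp - 1).toNat) hk hpm (by omega)
      omega
    have hsucc := fun (k : Nat) (hk : k < arr.length) (hkp : pred ≤ (arr[k]).2) =>
      pv_succ_min pred lo arr h1 hG1 hkm1 (by omega) k hk hkp
    have hpredm := fun (k : Nat) (hk : k < arr.length) (hkp : (arr[k]).2 < pred) =>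
      pv_pred_min pred lo pp arr h1 hG1 hG2 hpp0 hpp1 hqk hppk hppv hGP1 k hk hkp
    have hminall : ∀ (mm : Int × Int × Int),
        pvLeLex (mm.1, mm.2.1) ((arr[lo.toNat]).2 - pred, (arr[lo.toNat]).1) →
        pvLeLex (mm.1, mm.2.1) (pred - (arr[pp.toNat]).2, (arr[pp.toNat]).1) →
        ∀ (k : Nat) (hk : k < arr.length),
          pvLeLex (mm.1, mm.2.1) (|pred - (arr[k]).2|, (arr[k]).1) := by
      intro mm hm1 hm2 k hk
      by_cases hkp : pred ≤ (arr[k]).2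
      · exact pv_leLex_trans hm1 (hsucc k hk hkp)
      · push_neg at hkp
        exact pv_leLex_trans hm2 (hpredm k hk hkp)
    rw [show pyMinT ([((arr[lo.toNat]).2 - pred, (arr[lo.toNat]).1, lo)]
          ++ [(pred - (arr[pp.toNat]).2, (arr[pp.toNat]).1, pp)])
        = some (if pyLt3 (pred - (arr[pp.toNat]).2, (arr[pp.toNat]).1, pp)
                  ((arr[lo.toNat]).2 - pred, (arr[lo.toNat]).1, lo)
            then (pred - (arr[pp.toNat]).2, (arr[pp.toNat]).1, pp)
            else ((arr[lo.toNat]).2 - pred, (arr[lo.toNat]).1, lo)) from rfl]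
    by_cases h3c : pyLt3 (pred - (arr[pp.toNat]).2, (arr[pp.toNat]).1, pp)
        ((arr[lo.toNat]).2 - pred, (arr[lo.toNat]).1, lo) = true
    · rw [if_pos h3c]
      exact pv_step_conclude tol pred arr rem t h1 h2 h3 hnd
        (pred - (arr[pp.toNat]).2, (arr[pp.toNat]).1, pp) pp.toNat hppk
        (show pp = ((pp.toNat : Nat) : Int) from by omega) rfl
        ((abs_of_nonneg (by omega)).symm)
        (hminall _ (pv_lt3_le _ _ h3c) (pv_leLex_refl _))
    · rw [if_neg h3c]
      have hf : pyLt3 (pred - (arr[pp.toNat]).2, (arr[pp.toNat]).1, pp)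
          ((arr[lo.toNat]).2 - pred, (arr[lo.toNat]).1, lo) = false :=
        Bool.eq_false_iff.mpr h3c
      exact pv_step_conclude tol pred arr rem t h1 h2 h3 hnd
        ((arr[lo.toNat]).2 - pred, (arr[lo.toNat]).1, lo) lo.toNat hkm1
        (show lo = ((lo.toNat : Nat) : Int) from by omega) rfl
        (by rw [abs_sub_comm]; exact (abs_of_nonneg (by omega)).symm)
        (hminall _ (pv_leLex_refl _) (pv_lt3_ge _ _ hf))
  · -- lo = 0: every remaining value is ≥ pred
    have hkm1 : lo.toNat < arr.length := by omega
    rw [if_pos hl, if_neg hz, pv_pyGet_in arr lo (by omega) hkm1]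
    dsimp only
    simp only [List.append_nil]
    rw [show pyMinT [((arr[lo.toNat]).2 - pred, (arr[lo.toNat]).1, lo)]
        = some ((arr[lo.toNat]).2 - pred, (arr[lo.toNat]).1, lo) from rfl]
    have hvlo : pred ≤ (arr[lo.toNat]).2 := hG2 lo.toNat hkm1 (by omega)
    exact pv_step_conclude tol pred arr rem t h1 h2 h3 hnd
      ((arr[lo.toNat]).2 - pred, (arr[lo.toNat]).1, lo) lo.toNat hkm1
      (show lo = ((lo.toNat : Nat) : Int) from by omega) rfl
      (by rw [abs_sub_comm]; exact (abs_of_nonneg (by omega)).symm)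
      (fun k hk => pv_succ_min pred lo arr h1 hG1 hkm1 (by omega) k hk (hG2 k hk (by omega)))
  · -- lo = length: every remaining value is < pred
    have hqk : (lo - 1).toNat < arr.length := by omega
    rw [if_neg hl, if_pos hz, pv_pyGet_in arr (lo - 1) (by omega) hqk]
    dsimp only
    simp only [List.nil_append]
    set pp := firstGe arr ((arr[(lo - 1).toNat]).2) 0 (lo - 1) with hppdef
    have hspec2 := firstGe_spec arr ((arr[(lo - 1).toNat]).2) ((lo - 1) - 0).toNat 0 (lo - 1) rfl
      (le_refl 0) (by omega) (by omega)
    rw [← hppdef] at hspec2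
    clear_value pp
    obtain ⟨hpp0, hpp1, hppb1, hppb2⟩ := hspec2
    have hppk : pp.toNat < arr.length := by omega
    rw [pv_pyGet_in arr pp hpp0 hppk]
    dsimp only
    have hvq : (arr[(lo - 1).toNat]).2 < pred := hG1 ((lo - 1).toNat) hqk (by omega)
    have hppv : (arr[pp.toNat]).2 = (arr[(lo - 1).toNat]).2 := by
      have hmono := pv_lex_mono arr h1 pp.toNat ((lo - 1).toNat) hppk hqk (by omega)
      rcases lt_or_eq_of_le hmono with hlt | heq
      · exfalso
        have hplt : pp < lo - 1 := by
          by_contra hc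
          push_neg at hc
          have hee : pp.toNat = (lo - 1).toNat := by omega
          simp only [hee] at hlt
          exact lt_irrefl _ hlt
        have hpge := hppb2 hplt
        rw [PySem.List.pyGetD_eq_getElem arr _ (by omega) (by omega)] at hpge
        omega
      · exact heq
    have hGP1 : ∀ (k : Nat) (hk : k < arr.length), (k : Int) < pp →
        (arr[k]).2 < (arr[(lo - 1).toNat]).2 := by
      intro k hk hkpp
      have h0pp : 0 < pp := by omega
      have hplt := hppb1 h0pp
      have hpm : (pp - 1).toNat < arr.length := by omega
      rw [PySem.List.pyGetD_eq_getElem arr _ (by omega) (by omega)] at hplt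
      have hmono := pv_lex_mono arr h1 k ((pp - 1).toNat) hk hpm (by omega)
      omega
    rw [show pyMinT [(pred - (arr[pp.toNat]).2, (arr[pp.toNat]).1, pp)]
        = some (pred - (arr[pp.toNat]).2, (arr[pp.toNat]).1, pp) from rfl]
    exact pv_step_conclude tol pred arr rem t h1 h2 h3 hnd
      (pred - (arr[pp.toNat]).2, (arr[pp.toNat]).1, pp) pp.toNat hppk
      (show pp = ((pp.toNat : Nat) : Int) from by omega) rfl
      ((abs_of_nonneg (by omega)).symm)
      (fun k hk => pv_pred_min pred lo pp arr h1 hG1 hG2 hpp0 hpp1 hqk hppk hppv hGP1 k hk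
        (hG1 k hk (by omega)))
  · -- no remaining gts at all
    have hlen : arr.length = 0 := by omega
    have harr : arr = [] := List.length_eq_zero_iff.mp hlen
    have hrem : rem = [] := by
      rw [List.eq_nil_iff_forall_not_mem]
      intro p hp
      have := (h2 p).mpr hp
      rw [harr] at this
      simp at this
    rw [if_neg hl, if_neg hz]
    simp only [List.append_nil]
    rw [show pyMinT ([] : List (Int × Int × Int)) = none from rfl]
    simp only [specStep, hrem, bestOf]
    exact ⟨trivial, h1, by rw [hrem] at h2; exact h2, by rw [hrem] at h3; exact h3⟩

-- ===== outer folds =====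
lemma pv_outerB (tol : Int) :
    ∀ (preds : List Int) (arr rem : List (Int × Int)) (t : Int),
      arr.Pairwise pvLexLt → (∀ p, p ∈ arr ↔ p ∈ rem) →
      rem.Pairwise (fun p q => p.1 < q.1) →
      (preds.foldl (altStep tol) (arr, t)).2 = (preds.foldl (specStep tol) (rem, t)).2 := by
  intro preds
  induction preds with
  | nil => intro arr rem t _ _ _; rfl
  | cons pred preds ih =>
    intro arr rem t h1 h2 h3
    simp only [List.foldl_cons]
    obtain ⟨he, hp1, hp2, hp3⟩ := altStep_spec tol pred arr rem t h1 h2 h3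
    have harr : altStep tol (arr, t) pred
        = ((altStep tol (arr, t) pred).1, (specStep tol (rem, t) pred).2) := by
      rw [← he]
    have hrem : specStep tol (rem, t) pred
        = ((specStep tol (rem, t) pred).1, (specStep tol (rem, t) pred).2) := rfl
    rw [harr, hrem]
    exact ih _ _ _ hp1 hp2 hp3

-- ===== VERDICT (by name: the statement is the Claim_ definition above) =====
theorem match_boundaries_spec : Claim_equal_match_boundaries := by
  intro preds gts tolerance _
  show _ = _
  unfold match_boundaries match_boundaries_alt
  have hA := pv_outerA gts tolerance preds PySem.Set.empty 0
  have hfilter : (PySem.List.enumerate gts).filter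
      (fun p => !PySem.Set.contains PySem.Set.empty p.1) = PySem.List.enumerate gts := by
    rw [List.filter_eq_self]
    intro p _
    simp [PySem.Set.contains, PySem.Set.empty]
  rw [hfilter] at hA
  have hB := pv_outerB tolerance preds
    (PySem.List.sorted (PySem.List.enumerate gts) (fun p => p.2) false)
    (PySem.List.enumerate gts) 0
    (pv_sorted_lex _ (PySem.List.pairwise_lt_enumerate gts 0))
    (fun p => (PySem.List.sorted_perm _ _ _).mem_iff)
    (PySem.List.pairwise_lt_enumerate gts 0)
  simp only [hA, hB]
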